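-- pv_equiv track=rewrite | github.com/ByPro8/METABot-Tester | tools/template_check.py | _build_template_grouped
-- ===== SOURCE A (Python) =====
-- from typing import Dict, List, Tuple, Any, Optional
--
-- def _build_template_grouped(
--     required_keys: List[str],
--     expected_values: Dict[str, str],
-- ) -> Dict[str, Dict[str, str]]:
--     """
--     Returns grouped template dict: {Group: {Tag: expected_value_or_placeholder}}
--     """
--     out: Dict[str, Dict[str, str]] = {}
--     for k in required_keys:
--         group, tag = k.split(".", 1)
--         val = expected_values.get(k, "(no expected value)")
--         out.setdefault(group, {})[tag] = val
--     return out
-- ===== SOURCE B (Python) =====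
-- # Two-pass alternative: split all keys into (group, tag, value) triples first,
-- # then build the result group-by-group from the distinct groups in first-occurrence order.
-- def _build_template_grouped(required_keys, expected_values):
--     triples = []
--     for k in required_keys:
--         group, tag = k.split(".", 1)
--         triples.append((group, tag, expected_values.get(k, "(no expected value)")))
--     groups = list(dict.fromkeys(g for g, _, _ in triples))
--     return {g: {t: v for g2, t, v in triples if g2 == g} for g in groups}
-- ===== Notes on version B (the rewrite author's own statement) =====
-- stated objective: alternative
-- what changed: Replaces the single-pass setdefault insertion with a two-pass strategy: first materialize all (group, tag, value) triples, then emit one inner dict per distinct group (first-occurrence order) by filtering the triple list.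
-- outside the precondition, e.g. on _build_template_grouped(['nodot'], {}): A raises ValueError, B raises ValueError
import Mathlib
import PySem

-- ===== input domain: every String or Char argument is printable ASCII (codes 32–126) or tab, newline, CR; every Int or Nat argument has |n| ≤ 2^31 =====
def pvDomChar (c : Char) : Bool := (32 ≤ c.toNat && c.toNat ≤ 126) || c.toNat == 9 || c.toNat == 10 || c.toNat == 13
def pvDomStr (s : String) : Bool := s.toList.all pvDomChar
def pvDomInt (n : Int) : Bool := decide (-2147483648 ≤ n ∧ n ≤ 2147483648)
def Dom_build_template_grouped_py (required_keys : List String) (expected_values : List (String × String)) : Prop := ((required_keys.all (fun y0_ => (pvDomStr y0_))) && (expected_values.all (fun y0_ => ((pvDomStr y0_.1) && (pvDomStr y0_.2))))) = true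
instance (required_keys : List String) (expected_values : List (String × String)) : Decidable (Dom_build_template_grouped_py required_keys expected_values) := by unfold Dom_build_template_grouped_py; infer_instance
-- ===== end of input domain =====

-- B replaces A's one-pass setdefault insertion by a two-pass split-then-group-by-distinct-groups strategy (alternative decomposition, not faster).

-- ===== PORT A =====
-- k.split(".", 1); sep is nonempty so splitMax? is always some
def pvSplitKeyA (k : String) : List String := (PySem.Str.splitMax? k "." 1).getD []

def build_template_grouped_py (required_keys : List String) (expected_values : List (String × String)) : List (String × List (String × String)) :=
  (required_keys.foldl
    (fun (out : PySem.Dict String (PySem.Dict String String)) k =>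
      match pvSplitKeyA k with
      | [group, tag] =>
        let val := (expected_values.lookup k).getD "(no expected value)"
        -- out.setdefault(group, {})[tag] = val
        out.insert group ((out.getD group PySem.Dict.empty).insert tag val)
      | _ => out   -- key without "." : Python raises ValueError here; excluded by Pre_
    ) PySem.Dict.empty).items.map (fun p => (p.1, p.2.items))

-- ===== PORT B =====
-- k.split(".", 1), as in port A (B's own copy)
def pvSplitKeyB (k : String) : List String := (PySem.Str.splitMax? k "." 1).getD []

-- one triple (group, tag, value) per key; the loop body of B's first pass
def pvTripleOf (expected_values : List (String × String)) (k : String) : String × String × String :=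
  let ps := pvSplitKeyB k
  if h : ps.length = 2 then
    (ps[0], ps[1], (expected_values.lookup k).getD "(no expected value)")
  else ("", "", "")   -- key without "." : Python raises ValueError here; excluded by Pre_

def build_template_grouped_py_alt (required_keys : List String) (expected_values : List (String × String)) : List (String × List (String × String)) :=
  let triples := required_keys.map (pvTripleOf expected_values)
  let groups := PySem.List.dedup (triples.map (·.1))
  groups.map (fun g =>
    (g, ((triples.filter (fun p => p.1 == g)).foldl
          (fun (d : PySem.Dict String String) p => d.insert p.2.1 p.2.2)
          PySem.Dict.empty).items))

-- ===== PRECONDITION & SPEC =====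
-- Pre_ excludes keys without a "." (Python's tuple unpacking raises ValueError there, in A and in B alike).
def Pre_build_template_grouped_py (required_keys : List String) (expected_values : List (String × String)) : Prop :=
  ∀ k ∈ required_keys, '.' ∈ k.toList
instance (required_keys : List String) (expected_values : List (String × String)) : Decidable (Pre_build_template_grouped_py required_keys expected_values) := by unfold Pre_build_template_grouped_py; infer_instance
def pvWitness_build_template_grouped_py : List String × (List (String × String)) :=
  (["Group.Tag", "Group.Other", "B.x.y"], [("Group.Tag", "v1")])

def Spec_build_template_grouped_py (required_keys : List String) (expected_values : List (String × String)) (out : List (String × List (String × String))) : Prop := out = build_template_grouped_py_alt required_keys expected_values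
instance (required_keys : List String) (expected_values : List (String × String)) (out : List (String × List (String × String))) : Decidable (Spec_build_template_grouped_py required_keys expected_values out) := by unfold Spec_build_template_grouped_py; infer_instance

-- ===== CLAIM (what is proved, stated in full; the proofs are below) =====
def Claim_equal_build_template_grouped_py : Prop := ∀ (required_keys : List String) (expected_values : List (String × String)), Dom_build_template_grouped_py required_keys expected_values → Pre_build_template_grouped_py required_keys expected_values → Spec_build_template_grouped_py required_keys expected_values (build_template_grouped_py required_keys expected_values)

-- ===== LEMMAS AND PROOFS =====

-- proof-only helpers
def pvStep (out : PySem.Dict String (PySem.Dict String String)) (p : String × String × String) :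
    PySem.Dict String (PySem.Dict String String) :=
  out.insert p.1 ((out.getD p.1 PySem.Dict.empty).insert p.2.1 p.2.2)

def pvInner (d : PySem.Dict String String) (l : List (String × String × String)) :
    PySem.Dict String String :=
  l.foldl (fun d p => d.insert p.2.1 p.2.2) d

theorem pv_go_length :
    ∀ (fuel : Nat) (l cur : List Char) (acc : List (List Char)), l.length < fuel →
      (PySem.Chars.splitOnMax.go ['.'] fuel 1 l cur acc).length
        = acc.length + (if '.' ∈ l then 2 else 1) := by
  intro fuel
  induction fuel with
  | zero => intro l cur acc h; omega
  | succ f ih =>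
    intro l cur acc h
    match l with
    | [] => simp [PySem.Chars.splitOnMax.go]
    | c :: rest =>
      rw [PySem.Chars.splitOnMax.go]
      simp only [if_neg (by norm_num : (1:Nat) ≠ 0)]
      by_cases hp : (['.'] : List Char).isPrefixOf (c :: rest) = true
      · rw [if_pos hp]
        have hc : '.' = c := by
          simpa [List.isPrefixOf] using hp
        subst hc
        cases f with
        | zero => simp at h
        | succ f' =>
          cases hdrop : (List.drop (['.'] : List Char).length ('.' :: rest)) with
          | nil => rw [PySem.Chars.splitOnMax.go]; simp; omega
          | cons d ds => rw [PySem.Chars.splitOnMax.go]; simp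
      · rw [if_neg hp]
        have hc : c ≠ '.' := by
          intro hc; subst hc; simp [List.isPrefixOf] at hp
        rw [ih rest (c :: cur) acc (by simp at h ⊢; omega)]
        simp [List.mem_cons, Ne.symm hc]

theorem pvSplitKeyA_eq (k : String) : pvSplitKeyA k = pvSplitKeyB k := rfl

theorem pvSplitKey_shape (k : String) (h : '.' ∈ k.toList) :
    ∃ g t, pvSplitKeyB k = [g, t] := by
  have hlen : (PySem.Chars.splitOnMax k.toList ['.'] 1).length = 2 := by
    unfold PySem.Chars.splitOnMax
    rw [if_neg (by norm_num)]
    norm_num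
    rw [pv_go_length (k.length + 1) k.toList [] [] (by simp)]
    simp [h]
  unfold pvSplitKeyB PySem.Str.splitMax? PySem.Chars.splitMax?
  obtain ⟨a, b, hab⟩ : ∃ a b, PySem.Chars.splitOnMax k.toList ['.'] 1 = [a, b] := by
    match hsp : PySem.Chars.splitOnMax k.toList ['.'] 1 with
    | [a, b] => exact ⟨a, b, rfl⟩
    | [] | [_] | _ :: _ :: _ :: _ => rw [hsp] at hlen; simp at hlen
  exact ⟨String.ofList a, String.ofList b, by simp [hab]⟩

-- A's fold equals the fold over the precomputed triples, when every key splits in two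
theorem pv_fold_eq_triples (expected_values : List (String × String)) :
    ∀ (rk : List String) (D : PySem.Dict String (PySem.Dict String String)),
      (∀ k ∈ rk, '.' ∈ k.toList) →
      rk.foldl
        (fun (out : PySem.Dict String (PySem.Dict String String)) k =>
          match pvSplitKeyA k with
          | [group, tag] =>
            let val := (expected_values.lookup k).getD "(no expected value)"
            out.insert group ((out.getD group PySem.Dict.empty).insert tag val)
          | _ => out) D
      = (rk.map (pvTripleOf expected_values)).foldl pvStep D := by
  intro rk
  induction rk with
  | nil => intro D _; rfl
  | cons k rk ih =>
    intro D hpre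
    obtain ⟨g, t, hk⟩ := pvSplitKey_shape k (hpre k (by simp))
    have hkA : pvSplitKeyA k = [g, t] := by rw [pvSplitKeyA_eq]; exact hk
    simp only [List.foldl_cons, List.map_cons]
    rw [ih _ (fun k hk => hpre k (by simp [hk]))]
    congr 1
    simp [hk, hkA, pvStep, pvTripleOf]

-- the inner dict of each group after the fold
theorem pv_getD_fold (g : String) :
    ∀ (ts : List (String × String × String)) (D : PySem.Dict String (PySem.Dict String String)),
      (ts.foldl pvStep D).getD g PySem.Dict.empty
        = pvInner (D.getD g PySem.Dict.empty) (ts.filter (fun p => p.1 == g)) := by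
  intro ts
  induction ts with
  | nil => intro D; rfl
  | cons p ts ih =>
    intro D
    simp only [List.foldl_cons, List.filter_cons]
    rw [ih]
    by_cases hg : p.1 = g
    · subst hg
      simp [pvStep, PySem.Dict.getD_insert_self, pvInner]
    · rw [if_neg (by simpa using hg)]
      congr 1
      simp [pvStep, PySem.Dict.getD_insert, hg, Ne.symm]

theorem pv_keys_fold (ts : List (String × String × String)) :
    (ts.foldl pvStep PySem.Dict.empty).keys = PySem.Set.ofList (ts.map (fun p => p.1)) := by
  have := PySem.Dict.keys_foldl_insert_key (l := ts) (key := fun p => p.1)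
    (f := fun (d : PySem.Dict String (PySem.Dict String String)) p =>
      (d.getD p.1 PySem.Dict.empty).insert p.2.1 p.2.2)
    (d := PySem.Dict.empty)
  simpa [pvStep, PySem.Set.update_nil_left] using this

theorem pv_nodup_keys_fold (ts : List (String × String × String)) :
    (ts.foldl pvStep PySem.Dict.empty).keys.Nodup := by
  have := PySem.Dict.nodup_keys_foldl_insert_key (l := ts) (key := fun p => p.1)
    (f := fun (d : PySem.Dict String (PySem.Dict String String)) p =>
      (d.getD p.1 PySem.Dict.empty).insert p.2.1 p.2.2)
    (d := PySem.Dict.empty) (by simp)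
  simpa [pvStep] using this

-- ===== VERDICT (by name: the statement is the Claim_ definition above) =====
theorem build_template_grouped_py_spec : Claim_equal_build_template_grouped_py := by
  intro rk ev _hdom hpre
  unfold Spec_build_template_grouped_py
  unfold build_template_grouped_py build_template_grouped_py_alt
  rw [pv_fold_eq_triples ev rk PySem.Dict.empty hpre]
  set ts := rk.map (pvTripleOf ev) with hts
  have hitems := PySem.Dict.items_eq_map_keys (ts.foldl pvStep PySem.Dict.empty)
    (pv_nodup_keys_fold ts) PySem.Dict.empty
  rw [hitems, pv_keys_fold ts, List.map_map]
  simp only [← PySem.List.dedup_eq_ofList]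
  apply List.map_congr_left
  intro g _
  simp only [Function.comp]
  rw [pv_getD_fold g ts PySem.Dict.empty]
  rfl
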